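-- pv_equiv track=rewrite | github.com/Thejshri-A/Python-1000 | 529. Classify Temperatures.py | classify_temperatures
-- ===== SOURCE A (Python) =====
-- def classify_temperatures(temps):
--     classify=[]
--     for temp in temps:
--         if temp<10:
--             classify.append("Cold")
--         elif temp<25:
--             classify.append("Moderate")
--         elif temp<50:
--             classify.append("Hot")
--         else:
--             classify.append("")
--     return classify
-- ===== SOURCE B (Python) =====
-- import bisect
--
-- THRESHOLDS = [10, 25, 50]
-- LABELS = ["Cold", "Moderate", "Hot", ""]
--
-- def classify_temperatures(temps):
--     return [LABELS[bisect.bisect_right(THRESHOLDS, temp)] for temp in temps]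
-- ===== Notes on version B (the rewrite author's own statement) =====
-- stated objective: idiomatic
-- what changed: Replaces the if/elif/else branch cascade with a label table indexed by bisect.bisect_right into a sorted threshold list, built as a list comprehension.
import Mathlib
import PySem

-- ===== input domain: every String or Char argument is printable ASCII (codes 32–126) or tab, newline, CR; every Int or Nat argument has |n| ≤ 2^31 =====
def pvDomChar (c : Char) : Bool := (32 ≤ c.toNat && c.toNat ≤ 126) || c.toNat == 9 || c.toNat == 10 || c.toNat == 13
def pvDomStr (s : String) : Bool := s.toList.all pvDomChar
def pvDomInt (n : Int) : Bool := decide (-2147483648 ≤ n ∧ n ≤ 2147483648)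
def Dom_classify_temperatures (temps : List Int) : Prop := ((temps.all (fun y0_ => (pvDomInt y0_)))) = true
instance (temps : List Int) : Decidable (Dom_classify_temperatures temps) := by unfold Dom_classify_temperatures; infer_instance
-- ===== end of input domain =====

-- B replaces A's if/elif cascade with a bisect_right lookup into a label table (idiomatic, same cost).
-- ===== PORT A =====
def classify_temperatures (temps : List Int) : List String :=
  temps.foldl (fun classify temp =>
    if temp < 10 then classify ++ ["Cold"]
    else if temp < 25 then classify ++ ["Moderate"]
    else if temp < 50 then classify ++ ["Hot"]
    else classify ++ [""]) []

-- ===== PORT B =====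
-- literal port of Python's bisect.bisect_right (lo=0, hi=len) with fuel hi-lo
def pvBisectGo (xs : List Int) (x : Int) : Nat → Nat → Nat → Nat
  | 0, lo, _ => lo
  | fuel+1, lo, hi =>
    if lo < hi then
      let mid := (lo + hi) / 2
      if x < xs.getD mid 0 then pvBisectGo xs x fuel lo mid
      else pvBisectGo xs x fuel (mid+1) hi
    else lo

def pvBisectRight (xs : List Int) (x : Int) : Nat :=
  pvBisectGo xs x xs.length 0 xs.length

def pvThresholds : List Int := [10, 25, 50]
def pvLabels : List String := ["Cold", "Moderate", "Hot", ""]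

def classify_temperatures_alt (temps : List Int) : List String :=
  temps.map (fun temp => pvLabels.getD (pvBisectRight pvThresholds temp) "")

-- ===== PRECONDITION & SPEC =====
def Spec_classify_temperatures (temps : List Int) (out : List String) : Prop := out = classify_temperatures_alt temps
instance (temps : List Int) (out : List String) : Decidable (Spec_classify_temperatures temps out) := by unfold Spec_classify_temperatures; infer_instance

-- ===== CLAIM (what is proved, stated in full; the proofs are below) =====
def Claim_equal_classify_temperatures : Prop := ∀ (temps : List Int), Dom_classify_temperatures temps → Spec_classify_temperatures temps (classify_temperatures temps)

-- ===== LEMMAS AND PROOFS =====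

-- ===== VERDICT (by name: the statement is the Claim_ definition above) =====
-- per-element agreement between A's branch cascade and B's table lookup
theorem classify_step (t : Int) :
    (if t < 10 then "Cold" else if t < 25 then "Moderate" else if t < 50 then "Hot" else "") =
    pvLabels.getD (pvBisectRight pvThresholds t) "" := by
  by_cases h1 : t < 10 <;> by_cases h2 : t < 25 <;> by_cases h3 : t < 50 <;>
    simp [pvBisectRight, pvBisectGo, pvThresholds, pvLabels, h1, h2, h3] <;> omega

theorem classify_foldl (temps : List Int) (acc : List String) :
    temps.foldl (fun classify temp =>
      if temp < 10 then classify ++ ["Cold"]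
      else if temp < 25 then classify ++ ["Moderate"]
      else if temp < 50 then classify ++ ["Hot"]
      else classify ++ [""]) acc =
    acc ++ temps.map (fun temp => pvLabels.getD (pvBisectRight pvThresholds temp) "") := by
  induction temps generalizing acc with
  | nil => simp
  | cons t ts ih =>
    simp only [List.foldl, List.map]
    rw [show (if t < 10 then acc ++ ["Cold"]
        else if t < 25 then acc ++ ["Moderate"]
        else if t < 50 then acc ++ ["Hot"]
        else acc ++ [""]) = acc ++ [pvLabels.getD (pvBisectRight pvThresholds t) ""] by
      rw [← classify_step]; split_ifs <;> rfl]
    rw [ih]; simp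

theorem classify_temperatures_spec : Claim_equal_classify_temperatures := by
  intro temps _
  unfold Spec_classify_temperatures classify_temperatures classify_temperatures_alt
  simpa using classify_foldl temps []
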